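-- pv_equiv track=rewrite | github.com/tsinghua-fib-lab/DisasterMobLLM | codes/utils.py | get_train_test_set
-- ===== SOURCE A (Python) =====
-- def get_train_test_set(target_city: str):
--     datasets = [
--         "qingyuan",
--         "shaoguan",
--         "hezhou",
--         "zhongshan_01",
--         "zhuhai_01",
--         "wuzhou_01",
--         "handan",
--     ]
--     modes = ["before", "dis", "after"]
--     train = []
--     test = []
--     for city in datasets:
--         if not city == target_city:
--             for mode in modes:
--                 train.append(f"{city}-{mode}")
--         else:
--             train.append(f"{city}-before")
--             train.append(f"{city}-dis")
--             test.append(f"{city}-after")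
--     return train, test
-- ===== SOURCE B (Python) =====
-- def get_train_test_set(target_city: str):
--     datasets = [
--         "qingyuan",
--         "shaoguan",
--         "hezhou",
--         "zhongshan_01",
--         "zhuhai_01",
--         "wuzhou_01",
--         "handan",
--     ]
--     modes = ["before", "dis", "after"]
--     full = [f"{c}-{m}" for c in datasets for m in modes]
--     if target_city in datasets:
--         pos = 3 * datasets.index(target_city) + 2
--         return full[:pos] + full[pos + 1:], [full[pos]]
--     return full, []
-- ===== Notes on version B (the rewrite author's own statement) =====
-- stated objective: alternative
-- what changed: B builds the full 21-label city-mode grid unconditionally, then locates the held-out label by index arithmetic (pos = 3*datasets.index(target_city)+2) and splices it out with slices, instead of A's per-city branch that accumulates train/test during the loop.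
import Mathlib
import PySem

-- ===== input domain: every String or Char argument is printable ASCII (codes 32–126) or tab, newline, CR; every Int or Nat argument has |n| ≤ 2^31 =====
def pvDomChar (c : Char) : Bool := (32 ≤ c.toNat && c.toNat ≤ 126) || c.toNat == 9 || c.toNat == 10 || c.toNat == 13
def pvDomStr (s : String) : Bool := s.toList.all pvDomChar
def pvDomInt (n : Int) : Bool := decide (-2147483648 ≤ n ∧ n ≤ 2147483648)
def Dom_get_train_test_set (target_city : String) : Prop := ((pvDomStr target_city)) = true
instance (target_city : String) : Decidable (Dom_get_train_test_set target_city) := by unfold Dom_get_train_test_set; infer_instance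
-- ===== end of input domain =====

-- B builds the full city-mode grid once and splices out the held-out label by computed index; objective: alternative decomposition.


def pvDatasets : List String :=
  ["qingyuan", "shaoguan", "hezhou", "zhongshan_01", "zhuhai_01", "wuzhou_01", "handan"]

def pvModes : List String := ["before", "dis", "after"]

-- ===== PORT A =====
-- A's loop over datasets: accumulate (train, test), branching per city.
def get_train_test_set (target_city : String) : List String × List String :=
  pvDatasets.foldl
    (fun (acc : List String × List String) city =>
      if ¬ (city == target_city) then
        (acc.1 ++ pvModes.map (fun mode => city ++ "-" ++ mode), acc.2)
      else
        (acc.1 ++ [city ++ "-before", city ++ "-dis"], acc.2 ++ [city ++ "-after"]))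
    ([], [])

-- ===== PORT B =====
-- B: build the full grid, then splice out position 3*index+2 with slices;
-- 'if target_city in datasets: pos = datasets.index(...)' is ported as one match on index?
-- (some i ↔ the membership test succeeds); full[pos] is (pyGet? full pos).toList's element,
-- provably in range, so Option.toList yields exactly [full[pos]].
def get_train_test_set_alt (target_city : String) : List String × List String :=
  let full := pvDatasets.flatMap (fun c => pvModes.map (fun m => c ++ "-" ++ m))
  match PySem.List.index? pvDatasets target_city with
  | some i =>
      let pos : Int := 3 * (i : Int) + 2
      (PySem.List.slice full none (some pos) ++ PySem.List.slice full (some (pos + 1)) none,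
       (PySem.List.pyGet? full pos).toList)
  | none => (full, [])

-- ===== PRECONDITION & SPEC =====
def Spec_get_train_test_set (target_city : String) (out : List String × List String) : Prop := out = get_train_test_set_alt target_city
instance (target_city : String) (out : List String × List String) : Decidable (Spec_get_train_test_set target_city out) := by unfold Spec_get_train_test_set; infer_instance

-- ===== CLAIM (what is proved, stated in full; the proofs are below) =====
def Claim_equal_get_train_test_set : Prop := ∀ (target_city : String), Dom_get_train_test_set target_city → Spec_get_train_test_set target_city (get_train_test_set target_city)

-- ===== LEMMAS AND PROOFS =====

-- ===== VERDICT (by name: the statement is the Claim_ definition above) =====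
theorem get_train_test_set_spec : Claim_equal_get_train_test_set := by
  intro t _
  unfold Spec_get_train_test_set
  rcases Decidable.em (t ∈ pvDatasets) with hm | hm
  · fin_cases hm <;> decide
  · have hnone : List.idxOf? t pvDatasets = none := by
      rw [← PySem.List.index?_eq_idxOf?]
      exact (PySem.List.index?_eq_none_iff pvDatasets t).mpr hm
    simp only [pvDatasets, List.mem_cons, List.not_mem_nil, or_false, not_or] at hm
    obtain ⟨h1, h2, h3, h4, h5, h6, h7⟩ := hm
    simp only [pvDatasets] at hnone
    simp [get_train_test_set, get_train_test_set_alt, hnone,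
      pvDatasets, pvModes, List.foldl, beq_iff_eq,
      Ne.symm h1, Ne.symm h2, Ne.symm h3, Ne.symm h4, Ne.symm h5, Ne.symm h6, Ne.symm h7]
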